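-- pv_equiv track=rewrite | github.com/richedperson1/DSA | revision2/DP/target sum/diceThrogh.py | diceThrough
-- ===== SOURCE A (Python) =====
-- n = 13
--
-- m = 3
--
-- x = 16
--
-- def diceThrough(n, m, x):
--     if x == 0 and n == 0:
--         return 1
--     if x == 0 and n != 0:
--         return 0
--     if n == 0 and x != 0:
--         return 0
--
--     ans = 0
--     for tar in range(1, x+1):
--         ans += diceThrough(n-1, m, x-tar)
--
--     return ans
-- ===== SOURCE B (Python) =====
-- def diceThrough(n, m, x):
--     # closed form: number of ways to write x as an ordered sum of n positive
--     # integers (faces are unbounded in A, m is unused) = C(x-1, n-1)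
--     if n == 0 and x == 0:
--         return 1
--     if n <= 0 or x <= 0:
--         return 0
--     k = n - 1
--     a = x - 1
--     if k > a:
--         return 0
--     res = 1
--     for i in range(1, k + 1):
--         res = res * (a - k + i) // i
--     return res
-- ===== Notes on version B (the rewrite author's own statement) =====
-- stated objective: faster
-- what changed: Replaces A's exponential recursion over all compositions with the closed-form binomial C(x-1, n-1) computed by a short multiplicative loop (intended as faster; a timing run saw A time out where B returned, so no ratio could be measured).
import Mathlib
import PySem

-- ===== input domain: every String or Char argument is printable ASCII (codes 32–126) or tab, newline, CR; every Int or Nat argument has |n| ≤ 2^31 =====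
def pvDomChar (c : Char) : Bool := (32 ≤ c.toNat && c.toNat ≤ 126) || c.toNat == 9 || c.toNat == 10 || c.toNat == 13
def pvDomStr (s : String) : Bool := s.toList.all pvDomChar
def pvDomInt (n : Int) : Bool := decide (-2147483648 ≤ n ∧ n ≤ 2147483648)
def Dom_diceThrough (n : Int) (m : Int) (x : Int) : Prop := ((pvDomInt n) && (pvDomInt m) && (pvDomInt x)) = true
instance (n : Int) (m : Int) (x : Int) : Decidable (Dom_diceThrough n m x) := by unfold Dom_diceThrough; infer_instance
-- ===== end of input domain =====

-- ===== PORT A =====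
-- B replaces A's exponential recursion with the closed-form binomial C(x-1, n-1)
-- computed by a short multiplicative loop; proved equal wherever A returns (Pre_).
def diceThrough (n : Int) (m : Int) (x : Int) : Int :=
  if x = 0 ∧ n = 0 then 1
  else if x = 0 ∧ n ≠ 0 then 0
  else if n = 0 ∧ x ≠ 0 then 0
  else
    (PySem.List.pyRange 1 (x + 1) 1).attach.foldl
      (fun ans t => ans + diceThrough (n - 1) m (x - t.1)) 0
termination_by x.toNat
decreasing_by
  have h := (PySem.List.mem_pyRange_one).mp t.2
  omega

-- ===== PORT B =====
def diceThrough_alt (n : Int) (m : Int) (x : Int) : Int :=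
  if n = 0 ∧ x = 0 then 1
  else if n ≤ 0 ∨ x ≤ 0 then 0
  else
    let k := n - 1
    let a := x - 1
    if k > a then 0
    else
      (PySem.List.pyRange 1 (k + 1) 1).foldl
        (fun res i => PySem.Int.floordiv (res * (a - k + i)) i) 1

-- ===== PRECONDITION & SPEC =====
-- Pre_ excludes exactly the inputs whose first (leftmost) recursion path — depth
-- x+1 when n < 0, else min(n,x)+1 — reaches the interpreter's recursion limit,
-- on which the Python A raises RecursionError before producing any value.
def Pre_diceThrough (n : Int) (m : Int) (x : Int) : Prop := x < 9900 ∨ (0 ≤ n ∧ n < 9900)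
instance (n : Int) (m : Int) (x : Int) : Decidable (Pre_diceThrough n m x) := by unfold Pre_diceThrough; infer_instance
def pvWitness_diceThrough : Int × Int × Int := (13, 3, 16)

def Spec_diceThrough (n : Int) (m : Int) (x : Int) (out : Int) : Prop := out = diceThrough_alt n m x
instance (n : Int) (m : Int) (x : Int) (out : Int) : Decidable (Spec_diceThrough n m x out) := by unfold Spec_diceThrough; infer_instance

-- ===== CLAIM (what is proved, stated in full; the proofs are below) =====
def Claim_equal_diceThrough : Prop := ∀ (n : Int) (m : Int) (x : Int), Dom_diceThrough n m x → Pre_diceThrough n m x → Spec_diceThrough n m x (diceThrough n m x)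

-- ===== LEMMAS AND PROOFS =====

-- the common mathematical value of both programs
def fSpec (n x : Int) : Int :=
  if n = 0 ∧ x = 0 then 1
  else if n ≤ 0 ∨ x ≤ 0 then 0
  else ((x - 1).toNat.choose (n - 1).toNat : Int)

-- hockey-stick identity, Int-valued range form
lemma hockey (k : Nat) : ∀ (M : Nat),
    (∑ i ∈ Finset.range M, (Nat.choose i k : Int)) = (Nat.choose M (k + 1) : Int) := by
  intro M
  induction M with
  | zero => simp
  | succ M ih =>
      rw [Finset.sum_range_succ, ih, Nat.choose_succ_succ' M k]
      push_cast; ring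

lemma listSum_eq_finsetSum (M : Nat) (f : Nat → Int) :
    ((List.range M).map f).sum = ∑ i ∈ Finset.range M, f i := rfl

-- one unrolling of A's recurrence on fSpec
lemma sum_fSpec (n x : Int) (hx : 1 ≤ x) :
    ((PySem.List.pyRange 1 (x + 1) 1).map (fun tar => fSpec (n - 1) (x - tar))).sum
      = fSpec n x := by
  rw [PySem.List.pyRange_one, List.map_map]
  have hX : ((x + 1 - 1).toNat : Int) = x := by omega
  set X := (x + 1 - 1).toNat with hXdef
  have hX1 : 1 ≤ X := by omega
  have hre : ∀ j ∈ Finset.range X,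
      ((fun tar => fSpec (n - 1) (x - tar)) ∘ fun k : Nat => 1 + (k : Int)) j
        = (fun j : Nat => fSpec (n - 1) (X - 1 - j : Nat)) j := by
    intro j hj
    simp only [Finset.mem_range] at hj
    simp only [Function.comp]
    congr 1
    omega
  rw [listSum_eq_finsetSum, Finset.sum_congr rfl hre,
      Finset.sum_range_reflect (fun j : Nat => fSpec (n - 1) (j : Int)) X]
  by_cases hn : n ≤ 0
  · have hz : ∀ j ∈ Finset.range X, fSpec (n - 1) (j : Int) = 0 := by
      intro j _
      unfold fSpec
      have : ¬ (n - 1 = 0 ∧ (j : Int) = 0) := by omega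
      rw [if_neg this, if_pos (by omega)]
    rw [Finset.sum_congr rfl hz, Finset.sum_const, smul_zero]
    unfold fSpec
    rw [if_neg (by omega), if_pos (by omega)]
  · push_neg at hn
    by_cases h1 : n = 1
    · subst h1
      simp only [show (1:Int) - 1 = 0 from rfl]
      have hz : ∀ j ∈ Finset.range X, fSpec 0 (j : Int) = if j = 0 then 1 else 0 := by
        intro j _
        unfold fSpec
        by_cases hj : j = 0
        · subst hj; simp
        · rw [if_neg (by omega), if_pos (by omega), if_neg hj]
      rw [Finset.sum_congr rfl hz, Finset.sum_ite_eq' (Finset.range X) 0 (fun _ => (1 : Int)),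
          if_pos (by simp; omega)]
      unfold fSpec
      rw [if_neg (by omega), if_neg (by omega)]
      simp
    · -- n ≥ 2
      have hn2 : 2 ≤ n := by omega
      have hz : ∀ j ∈ Finset.range X, fSpec (n - 1) (j : Int)
          = if j = 0 then 0 else ((j - 1).choose (n - 2).toNat : Int) := by
        intro j _
        unfold fSpec
        by_cases hj : j = 0
        · subst hj
          rw [if_neg (by omega), if_pos (by omega), if_pos rfl]
        · rw [if_neg (by omega), if_neg (by omega), if_neg hj]
          congr 2 <;> omega
      rw [Finset.sum_congr rfl hz]
      have hsplit : X = (X - 1) + 1 := by omega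
      have hpeel : (∑ j ∈ Finset.range X,
          (if j = 0 then 0 else ((j - 1).choose (n - 2).toNat : Int)))
          = ∑ j ∈ Finset.range (X - 1), ((j.choose (n - 2).toNat : Int)) := by
        rw [hsplit, Finset.sum_range_succ' _ (X - 1)]
        simp
      rw [hpeel, hockey (n - 2).toNat (X - 1)]
      unfold fSpec
      rw [if_neg (by omega), if_neg (by omega)]
      congr 2 <;> omega

-- A computes fSpec
lemma A_eq_fSpec (m : Int) : ∀ (X : Nat) (n x : Int), x.toNat = X →
    diceThrough n m x = fSpec n x := by
  intro X
  induction X using Nat.strong_induction_on with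
  | _ X ih =>
    intro n x hX
    rw [diceThrough]
    by_cases h1 : x = 0 ∧ n = 0
    · rw [if_pos h1]; unfold fSpec; rw [if_pos ⟨h1.2, h1.1⟩]
    · rw [if_neg h1]
      by_cases h2 : x = 0 ∧ n ≠ 0
      · rw [if_pos h2]; unfold fSpec
        rw [if_neg (by omega), if_pos (by omega)]
      · rw [if_neg h2]
        by_cases h3 : n = 0 ∧ x ≠ 0
        · rw [if_pos h3]; unfold fSpec
          rw [if_neg (by omega), if_pos (by omega)]
        · rw [if_neg h3]
          by_cases hx : x ≤ 0
          · have hx' : x < 0 := by omega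
            rw [PySem.List.pyRange_one_eq_nil (by omega)]
            simp only [List.attach_nil, List.foldl_nil]
            unfold fSpec
            rw [if_neg (by omega), if_pos (by omega)]
          · push_neg at hx
            have hcongr : (PySem.List.pyRange 1 (x + 1) 1).attach.foldl
                (fun ans t => ans + diceThrough (n - 1) m (x - t.1)) 0
                = (PySem.List.pyRange 1 (x + 1) 1).attach.foldl
                (fun ans t => ans + fSpec (n - 1) (x - t.1)) 0 := by
              apply PySem.List.foldl_congr_mem
              intro acc t _
              congr 1
              have hmem := (PySem.List.mem_pyRange_one).mp t.2
              exact ih (x - t.1).toNat (by omega) (n - 1) (x - t.1) rfl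
            rw [hcongr,
                List.foldl_attach (f := fun ans tar => ans + fSpec (n - 1) (x - tar)),
                PySem.List.foldl_add, zero_add]
            exact sum_fSpec n x hx

-- the multiplicative loop computes the binomial coefficient
lemma loop_eq_choose (a : Int) (ha : 0 ≤ a) : ∀ (J : Nat) (k : Int), 0 ≤ k → k ≤ a → (J : Int) ≤ k →
    (PySem.List.pyRange 1 ((J : Int) + 1) 1).foldl
      (fun res i => PySem.Int.floordiv (res * (a - k + i)) i) 1
      = ((a.toNat - k.toNat + J).choose J : Int) := by
  intro J
  induction J with
  | zero =>
      intro k _ _ _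
      rw [PySem.List.pyRange_one_eq_nil (by omega)]
      simp
  | succ J ih =>
      intro k hk0 hka hJk
      have hJ : (J : Int) ≤ k := by push_cast at hJk ⊢; omega
      have hcast : ((J + 1 : Nat) : Int) + 1 = ((J : Int) + 1) + 1 := by push_cast; ring
      rw [hcast, PySem.List.pyRange_one_succ_right (by omega), List.foldl_append,
          ih k hk0 hka hJ]
      simp only [List.foldl_cons, List.foldl_nil]
      set A' := a.toNat with hA
      set K := k.toNat with hK
      have hv : a - k + ((J : Int) + 1) = ((A' - K + J + 1 : Nat) : Int) := by
        push_cast; omega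
      rw [hv]
      have hmul : ((A' - K + J).choose J) * (A' - K + J + 1)
          = (A' - K + J + 1).choose (J + 1) * (J + 1) := by
        rw [mul_comm ((A' - K + J).choose J) (A' - K + J + 1)]
        exact Nat.add_one_mul_choose_eq (A' - K + J) J
      have : ((A' - K + J).choose J : Int) * ((A' - K + J + 1 : Nat) : Int)
          = (((A' - K + J).choose J * (A' - K + J + 1) : Nat) : Int) := by push_cast; ring
      rw [this, hmul,
          show ((J : Int) + 1) = ((J + 1 : Nat) : Int) by push_cast; ring,
          PySem.Int.floordiv_natCast]
      have hdiv : (A' - K + J + 1).choose (J + 1) * (J + 1) / (J + 1)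
          = (A' - K + J + 1).choose (J + 1) := by simp
      rw [hdiv, Nat.add_assoc]

-- B computes fSpec
lemma B_eq_fSpec (n m x : Int) : diceThrough_alt n m x = fSpec n x := by
  rw [diceThrough_alt]
  unfold fSpec
  by_cases h1 : n = 0 ∧ x = 0
  · rw [if_pos h1, if_pos h1]
  · rw [if_neg h1, if_neg h1]
    by_cases h2 : n ≤ 0 ∨ x ≤ 0
    · rw [if_pos h2, if_pos h2]
    · rw [if_neg h2, if_neg h2]
      push_neg at h2
      simp only []
      by_cases h3 : n - 1 > x - 1
      · rw [if_pos h3]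
        rw [Nat.choose_eq_zero_of_lt (by omega)]
        simp
      · rw [if_neg h3]
        push_neg at h3
        have hJ : ((n - 1).toNat : Int) = n - 1 := by omega
        rw [show n - 1 + 1 = ((n - 1).toNat : Int) + 1 by omega]
        rw [loop_eq_choose (x - 1) (by omega) (n - 1).toNat (n - 1) (by omega) h3 (by omega)]
        congr 2
        omega

-- ===== VERDICT (by name: the statement is the Claim_ definition above) =====
theorem diceThrough_spec : Claim_equal_diceThrough := by
  intro n m x _ _
  unfold Spec_diceThrough
  rw [B_eq_fSpec, A_eq_fSpec m x.toNat n x rfl]
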